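-- pv_equiv track=rewrite | github.com/waseemcybersec/AI-powered-Brand-Protection-System-and-Risk-Assessment-System | src/generate.py | unicode_homoglyphs
-- ===== SOURCE A (Python) =====
-- import itertools
--
-- UNICODE_MAP = {
--     "a": ["а","ɑ","α"], "b":["Ь","β"], "c":["с","ϲ"], "d":["ԁ"], "e":["е","ҽ","ε"],
--     "i":["і","ı","ι"], "k":["κ","к"], "m":["м"], "n":["п"], "o":["о","ο","ɵ"],
--     "p":["р"], "s":["ѕ"], "t":["т"], "x":["х"]
-- }
--
-- def unicode_homoglyphs(name, max_replacements=2):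
--     indices = [i for i,ch in enumerate(name) if ch.lower() in UNICODE_MAP]
--     all_variants = set()
--     all_variants.add(name)
--     for num_replace in range(1, min(max_replacements+1, len(indices)+1)):
--         for positions in itertools.combinations(indices, num_replace):
--             options = []
--             for i,ch in enumerate(name):
--                 if i in positions:
--                     options.append(UNICODE_MAP[ch.lower()]+[ch])
--                 else:
--                     options.append([ch])
--             for combo in itertools.product(*options):
--                 all_variants.add("".join(combo))
--     return all_variants
-- ===== SOURCE B (Python) =====
-- import itertools
--
-- UNICODE_MAP = {
--     "a": ["а","ɑ","α"], "b":["Ь","β"], "c":["с","ϲ"], "d":["ԁ"], "e":["е","ҽ","ε"],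
--     "i":["і","ı","ι"], "k":["κ","к"], "m":["м"], "n":["п"], "o":["о","ο","ɵ"],
--     "p":["р"], "s":["ѕ"], "t":["т"], "x":["х"]
-- }
--
-- def _substitute(chars, positions, choice):
--     buf = list(chars)
--     for i, c in zip(positions, choice):
--         buf[i] = c
--     return "".join(buf)
--
-- def unicode_homoglyphs(name, max_replacements=2):
--     chars = list(name)
--     indices = [i for i, ch in enumerate(chars) if ch.lower() in UNICODE_MAP]
--     limit = min(max_replacements, len(indices))
--     variants = [name]
--     for k in range(1, limit + 1):
--         for positions in itertools.combinations(indices, k):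
--             pools = [UNICODE_MAP[chars[i].lower()] for i in positions]
--             for choice in itertools.product(*pools):
--                 variants.append(_substitute(chars, positions, choice))
--     return set(variants)
-- ===== Notes on version B (the rewrite author's own statement) =====
-- stated objective: alternative
-- what changed: A, for every k-subset of candidate positions, enumerates the full product of (homoglyph alternatives + the original character) over the chosen positions and relies on a set to deduplicate the redundant strings; B enumerates each distinct variant exactly once: per k-subset it takes the product over the homoglyph alternatives only and builds each variant with one substitution pass.
import Mathlib
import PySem

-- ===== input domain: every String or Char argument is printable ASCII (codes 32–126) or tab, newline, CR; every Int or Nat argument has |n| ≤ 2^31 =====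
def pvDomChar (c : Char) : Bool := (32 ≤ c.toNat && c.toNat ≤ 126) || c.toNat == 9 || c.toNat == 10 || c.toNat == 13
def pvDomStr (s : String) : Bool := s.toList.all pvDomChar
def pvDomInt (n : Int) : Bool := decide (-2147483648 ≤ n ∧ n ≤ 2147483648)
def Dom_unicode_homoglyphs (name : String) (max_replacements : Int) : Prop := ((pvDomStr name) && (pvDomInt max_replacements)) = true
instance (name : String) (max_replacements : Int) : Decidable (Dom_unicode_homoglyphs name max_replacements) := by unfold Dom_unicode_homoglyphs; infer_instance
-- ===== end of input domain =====

-- B builds each distinct homoglyph variant exactly once (per k-subset of positions, a product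
-- over the homoglyph alternatives only, one substitution pass per variant) instead of A's
-- product over alternatives-plus-original at every chosen position deduplicated through a set.

-- ===== PORT A =====
-- the module-level dict UNICODE_MAP (its keys are the 1-character strings "a","b",…, here Char)
def UNICODE_MAP : PySem.Dict Char (List Char) := ⟨[
  ('a', ['а','ɑ','α']), ('b', ['Ь','β']), ('c', ['с','ϲ']), ('d', ['ԁ']), ('e', ['е','ҽ','ε']),
  ('i', ['і','ı','ι']), ('k', ['κ','к']), ('m', ['м']), ('n', ['п']), ('o', ['о','ο','ɵ']),
  ('p', ['р']), ('s', ['ѕ']), ('t', ['т']), ('x', ['х'])]⟩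

-- UNICODE_MAP[ch.lower()] (both Pythons index the dict exactly like this)
def hgAlts (ch : Char) : List Char := UNICODE_MAP.getD (PySem.Chars.lowerChar ch) []

-- itertools.combinations(l, r): the r-element subsequences, in itertools' order
def pyCombinations {α : Type} : List α → Nat → List (List α)
  | _, 0 => [[]]
  | [], _ + 1 => []
  | x :: xs, r + 1 => ((pyCombinations xs r).map (x :: ·)) ++ pyCombinations xs (r + 1)

-- itertools.product(*ls): the rightmost factor varies fastest
def pyProduct {α : Type} : List (List α) → List (List α)
  | [] => [[]]
  | l :: ls => l.flatMap (fun x => (pyProduct ls).map (x :: ·))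

def unicode_homoglyphs (name : String) (max_replacements : Int) : List String :=
  let indices : List Int :=
    ((PySem.List.enumerate name.toList 0).filter
      (fun p => UNICODE_MAP.contains (PySem.Chars.lowerChar p.2))).map (fun p => p.1)
  -- all_variants = set(); all_variants.add(name)
  let init : PySem.Set String := PySem.Set.add PySem.Set.empty name
  (PySem.List.pyRange 1 (min (max_replacements + 1) (PySem.List.len indices + 1)) 1).foldl
    (fun s num_replace =>
      (pyCombinations indices num_replace.toNat).foldl
        (fun s positions =>
          let options : List (List Char) :=
            (PySem.List.enumerate name.toList 0).map
              (fun q => if q.1 ∈ positions then hgAlts q.2 ++ [q.2] else [q.2])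
          -- "".join(combo) of 1-character strings = String.ofList
          (pyProduct options).foldl (fun s combo => PySem.Set.add s (String.ofList combo)) s)
        s)
    init

-- ===== PORT B =====
-- _substitute(chars, positions, choice): copy chars, buf[i] = c pointwise, join
def substituteB (chars : List Char) (positions : List Int) (choice : List Char) : String :=
  String.ofList
    ((positions.zip choice).foldl (fun buf pc => PySem.List.pySetD buf pc.1 pc.2) chars)

def unicode_homoglyphs_alt (name : String) (max_replacements : Int) : List String :=
  let chars := name.toList
  let indices : List Int :=
    ((PySem.List.enumerate chars 0).filter
      (fun p => UNICODE_MAP.contains (PySem.Chars.lowerChar p.2))).map (fun p => p.1)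
  let limit : Int := min max_replacements (PySem.List.len indices)
  let variants : List String :=
    (PySem.List.pyRange 1 (limit + 1) 1).foldl
      (fun acc k =>
        (pyCombinations indices k.toNat).foldl
          (fun acc positions =>
            -- chars[i] is always in range here: pyGetD with an unused default
            let pools : List (List Char) :=
              positions.map (fun i => hgAlts (PySem.List.pyGetD chars i ' '))
            (pyProduct pools).foldl
              (fun acc choice => acc ++ [substituteB chars positions choice]) acc)
          acc)
      [name]
  PySem.Set.ofList variants

-- ===== PRECONDITION & SPEC =====
def Spec_unicode_homoglyphs (name : String) (max_replacements : Int) (out : List String) : Prop := out = unicode_homoglyphs_alt name max_replacements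
instance (name : String) (max_replacements : Int) (out : List String) : Decidable (Spec_unicode_homoglyphs name max_replacements out) := by unfold Spec_unicode_homoglyphs; infer_instance

-- ===== CLAIM (what is proved, stated in full; the proofs are below) =====
def Claim_equal_unicode_homoglyphs : Prop := ∀ (name : String) (max_replacements : Int), Dom_unicode_homoglyphs name max_replacements → Spec_unicode_homoglyphs name max_replacements (unicode_homoglyphs name max_replacements)

-- ===== LEMMAS AND PROOFS =====

-- ---- proof-side views of the two programs ----
def charAt (cs : List Char) (i : Int) : Char := PySem.List.pyGetD cs i ' '

def poolsOf (cs : List Char) (p : List Int) : List (List Char) :=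
  p.map (fun i => hgAlts (charAt cs i))

def newOf (cs : List Char) (p : List Int) : List String :=
  (pyProduct (poolsOf cs p)).map (fun choice => substituteB cs p choice)

def fillAt (cs : List Char) (p : List Int) (x : List Char) : List Char :=
  (PySem.List.enumerate cs 0).map (fun q => (((p.zip x).lookup q.1).getD q.2))

def indicesOf (cs : List Char) : List Int :=
  ((PySem.List.enumerate cs 0).filter
    (fun p => UNICODE_MAP.contains (PySem.Chars.lowerChar p.2))).map (fun p => p.1)

def blocksOf (ind : List Int) (R : Int) : List (List Int) :=
  (PySem.List.pyRange 1 R 1).flatMap (fun r => pyCombinations ind r.toNat)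

def optionsOf (cs : List Char) (p : List Int) : List (List Char) :=
  (PySem.List.enumerate cs 0).map (fun q => if q.1 ∈ p then hgAlts q.2 ++ [q.2] else [q.2])

def augPoolsOf (cs : List Char) (p : List Int) : List (List Char) :=
  p.map (fun i => hgAlts (charAt cs i) ++ [charAt cs i])

-- ---- the homoglyph dictionary ----
theorem hgAlts_not_ascii (c : Char) (x : Char) (hx : x ∈ hgAlts c) : 126 < x.toNat := by
  unfold hgAlts at hx
  generalize PySem.Chars.lowerChar c = d at hx
  simp only [UNICODE_MAP, PySem.Dict.getD, PySem.Dict.get?, List.find?_cons] at hx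
  repeat' split at hx
  all_goals simp only [Option.map, Option.getD, List.find?_nil] at hx
  all_goals fin_cases hx <;> decide

theorem hgAlts_nodup (c : Char) : (hgAlts c).Nodup := by
  unfold hgAlts
  generalize PySem.Chars.lowerChar c = d
  simp only [UNICODE_MAP, PySem.Dict.getD, PySem.Dict.get?, List.find?_cons]
  repeat' split
  all_goals simp only [Option.map, Option.getD, List.find?_nil]
  all_goals decide

theorem dom_char_le (c : Char) (h : pvDomChar c = true) : c.toNat ≤ 126 := by
  unfold pvDomChar at h
  simp only [Bool.or_eq_true, Bool.and_eq_true, decide_eq_true_eq, beq_iff_eq] at h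
  omega

theorem hgAlts_not_mem_self (c : Char) (hc : pvDomChar c = true) : c ∉ hgAlts c := by
  intro h
  exact absurd (hgAlts_not_ascii c c h) (by have := dom_char_le c hc; omega)

-- ---- pyProduct ----
theorem mem_pyProduct {α : Type} (ls : List (List α)) (y : List α) :
    y ∈ pyProduct ls ↔ List.Forall₂ (· ∈ ·) y ls := by
  induction ls generalizing y with
  | nil => simp [pyProduct, List.forall₂_nil_right_iff]
  | cons l ls ih =>
    simp only [pyProduct, List.mem_flatMap, List.mem_map, List.forall₂_cons_right_iff]
    constructor
    · rintro ⟨x, hx, t, ht, rfl⟩; exact ⟨x, t, hx, (ih t).1 ht, rfl⟩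
    · rintro ⟨x, t, hx, ht, rfl⟩; exact ⟨x, hx, t, (ih t).2 ht, rfl⟩

theorem length_of_mem_pyProduct {α : Type} (ls : List (List α)) (y : List α)
    (h : y ∈ pyProduct ls) : y.length = ls.length :=
  ((mem_pyProduct ls y).1 h).length_eq

theorem nodup_pyProduct {α : Type} (ls : List (List α)) (h : ∀ l ∈ ls, l.Nodup) :
    (pyProduct ls).Nodup := by
  induction ls with
  | nil => simp [pyProduct]
  | cons l ls ih =>
    simp only [pyProduct]
    rw [List.nodup_flatMap]
    refine ⟨fun x _ => ?_, ?_⟩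
    · exact (ih (fun t ht => h t (List.mem_cons_of_mem _ ht))).map
        (fun _ _ hab => List.tail_eq_of_cons_eq hab)
    · have hl : l.Nodup := h l List.mem_cons_self
      refine hl.imp ?_
      intro a b hab
      simp only [List.disjoint_left, List.mem_map]
      rintro z ⟨t, _, rfl⟩ ⟨t', _, hz⟩
      exact hab (List.head_eq_of_cons_eq hz).symm

-- ---- pyCombinations ----
theorem of_mem_pyCombinations {α : Type} :
    ∀ (l : List α) (r : Nat) (p : List α), p ∈ pyCombinations l r → p.Sublist l ∧ p.length = r := by
  intro l
  induction l with
  | nil =>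
    intro r p hp
    cases r with
    | zero => simp only [pyCombinations, List.mem_singleton] at hp; simp [hp]
    | succ r => simp [pyCombinations] at hp
  | cons x xs ih =>
    intro r p hp
    cases r with
    | zero => simp only [pyCombinations, List.mem_singleton] at hp; simp [hp]
    | succ r =>
      simp only [pyCombinations, List.mem_append, List.mem_map] at hp
      rcases hp with ⟨q, hq, rfl⟩ | hp
      · obtain ⟨h1, h2⟩ := ih r q hq
        exact ⟨List.Sublist.cons₂ x h1, by simp [h2]⟩
      · obtain ⟨h1, h2⟩ := ih (r + 1) p hp
        exact ⟨h1.cons x, h2⟩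

theorem mem_pyCombinations_of_sublist {α : Type} :
    ∀ (l : List α) (q : List α), q.Sublist l → q ∈ pyCombinations l q.length := by
  intro l
  induction l with
  | nil =>
    intro q hq
    rw [List.sublist_nil.1 hq]
    exact List.mem_cons_self
  | cons x xs ih =>
    intro q hq
    rcases List.sublist_cons_iff.1 hq with h | ⟨r, rfl, hr⟩
    · cases hql : q.length with
      | zero => rw [List.length_eq_zero_iff] at hql; subst hql; simp [pyCombinations]
      | succ n =>
        simp only [pyCombinations, List.mem_append]
        exact Or.inr (by rw [← hql]; exact ih q h)
    · simp only [List.length_cons, pyCombinations, List.mem_append, List.mem_map]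
      exact Or.inl ⟨r, ih r hr, rfl⟩

theorem nodup_pyCombinations {α : Type} :
    ∀ (l : List α) (r : Nat), l.Nodup → (pyCombinations l r).Nodup := by
  intro l
  induction l with
  | nil => intro r _; cases r <;> simp [pyCombinations]
  | cons x xs ih =>
    intro r hnd
    cases r with
    | zero => simp [pyCombinations]
    | succ r =>
      have hx : x ∉ xs := (List.nodup_cons.1 hnd).1
      have hxs : xs.Nodup := (List.nodup_cons.1 hnd).2
      simp only [pyCombinations]
      rw [List.nodup_append]
      refine ⟨(ih r hxs).map (fun _ _ hab => List.tail_eq_of_cons_eq hab), ih (r+1) hxs, ?_⟩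
      intro z hz1 w hw heq
      simp only [List.mem_map] at hz1
      obtain ⟨t, _, rfl⟩ := hz1
      have hsub := (of_mem_pyCombinations xs (r+1) w hw).1
      rw [← heq] at hsub
      exact hx (hsub.mem List.mem_cons_self)

-- ---- lookup on zipped position/choice lists ----
theorem lookup_cons_self {β : Type} (a : Int) (b : β) (l : List (Int × β)) :
    ((a, b) :: l).lookup a = some b := by
  simp [List.lookup]

theorem lookup_cons_ne {β : Type} (a k : Int) (b : β) (l : List (Int × β)) (h : k ≠ a) :
    ((a, b) :: l).lookup k = l.lookup k := by
  have hb : (k == a) = false := beq_eq_false_iff_ne.2 h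
  simp [List.lookup, hb]

theorem lookup_zip_eq_none (p : List Int) (x : List Char) (i : Int) (h : i ∉ p) :
    (p.zip x).lookup i = none := by
  induction p generalizing x with
  | nil => simp
  | cons a p ih =>
    cases x with
    | nil => simp
    | cons b x =>
      have hne : i ≠ a := fun hh => h (hh ▸ List.mem_cons_self)
      rw [List.zip_cons_cons, lookup_cons_ne a i b _ hne]
      exact ih x (fun hh => h (List.mem_cons_of_mem _ hh))

theorem lookup_zip_getElem (p : List Int) (x : List Char) (hnd : p.Nodup)
    (t : Nat) (ht : t < p.length) (hx : p.length = x.length) :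
    (p.zip x).lookup p[t] = some (x[t]'(hx ▸ ht)) := by
  induction p generalizing x t with
  | nil => simp at ht
  | cons a p ih =>
    cases x with
    | nil => simp at hx
    | cons b x =>
      cases t with
      | zero => simp
      | succ t =>
        have ha : p[t]'(by simpa using ht) ≠ a := by
          intro hh; exact (List.nodup_cons.1 hnd).1 (hh ▸ List.getElem_mem _)
        rw [List.zip_cons_cons, List.getElem_cons_succ, lookup_cons_ne a _ b _ ha]
        exact ih x (List.nodup_cons.1 hnd).2 t (by simpa using ht) (by simpa using hx)

theorem lookup_filter_getD (z : List (Int × Char)) (P : Int × Char → Bool)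
    (hk : (z.map Prod.fst).Nodup) (d : Int → Char)
    (hd : ∀ pr ∈ z, P pr = false → pr.2 = d pr.1) (j : Int) :
    ((z.filter P).lookup j).getD (d j) = (z.lookup j).getD (d j) := by
  induction z with
  | nil => simp
  | cons pr z ih =>
    obtain ⟨i, c⟩ := pr
    have hk' : (z.map Prod.fst).Nodup := (List.nodup_cons.1 (by simpa using hk)).2
    have hi : i ∉ z.map Prod.fst := (List.nodup_cons.1 (by simpa using hk)).1
    have ih' := ih hk' (fun pr h hp => hd pr (List.mem_cons_of_mem _ h) hp)
    by_cases hP : P (i, c)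
    · rw [List.filter_cons_of_pos hP]
      by_cases hj : j = i
      · subst hj; rw [lookup_cons_self, lookup_cons_self]
      · rw [lookup_cons_ne i j c _ hj, lookup_cons_ne i j c _ hj]; exact ih'
    · rw [List.filter_cons_of_neg (by simpa using hP)]
      by_cases hj : j = i
      · subst hj
        rw [lookup_cons_self]
        have hc : c = d j := hd (j, c) List.mem_cons_self (by simpa using hP)
        have hz : z.lookup j = none := by
          simp only [List.lookup_eq_none_iff]
          intro a hab
          simp only [bne_iff_ne, ne_eq]
          intro hja
          apply hi
          rw [hja]
          exact List.mem_map.2 ⟨a, hab, rfl⟩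
        rw [ih', hz]
        simp [hc]
      · rw [lookup_cons_ne i j c _ hj]; exact ih'

-- ---- zip/Forall₂ bookkeeping ----
theorem zip_mem_of_forall₂ (p : List Int) (x : List Char) (g : Int → List Char)
    (h : List.Forall₂ (· ∈ ·) x (p.map g)) : ∀ pr ∈ p.zip x, pr.2 ∈ g pr.1 := by
  induction p generalizing x with
  | nil => simp
  | cons i p ih =>
    cases x with
    | nil => simp
    | cons x0 x =>
      rcases h with _ | ⟨h0, hrest⟩
      intro pr hpr
      rcases List.mem_cons.1 hpr with rfl | hpr
      · exact h0
      · exact ih x hrest pr hpr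

theorem forall₂_of_zip_mem (z : List (Int × Char)) (g : Int → List Char)
    (h : ∀ pr ∈ z, pr.2 ∈ g pr.1) :
    List.Forall₂ (· ∈ ·) (z.map Prod.snd) ((z.map Prod.fst).map g) := by
  induction z with
  | nil => simp
  | cons pr z ih =>
    simp only [List.map_cons]
    exact List.Forall₂.cons (h pr List.mem_cons_self)
      (ih (fun pr hpr => h pr (List.mem_cons_of_mem _ hpr)))

theorem zip_map_fst_snd' (z : List (Int × Char)) : (z.map Prod.fst).zip (z.map Prod.snd) = z := by
  induction z with
  | nil => rfl
  | cons a t ih => simp [ih]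

-- ---- fillAt ----
theorem length_fillAt (cs : List Char) (p : List Int) (x : List Char) :
    (fillAt cs p x).length = cs.length := by
  simp [fillAt, PySem.List.length_enumerate]

theorem getElem_fillAt (cs : List Char) (p : List Int) (x : List Char) (j : Nat)
    (h : j < cs.length) :
    (fillAt cs p x)[j]'(by rw [length_fillAt]; exact h) =
      (((p.zip x).lookup (j : Int)).getD cs[j]) := by
  simp only [fillAt, List.getElem_map]
  rw [PySem.List.getElem_enumerate cs 0 j (by rwa [PySem.List.length_enumerate])]
  norm_num

theorem fillAt_nil (cs : List Char) (x : List Char) : fillAt cs [] x = cs := by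
  simp only [fillAt, List.zip_nil_left, List.lookup_nil, Option.getD_none]
  exact PySem.List.map_snd_enumerate cs 0

theorem fillAt_set (cs : List Char) (i : Int) (p : List Int) (x0 : Char) (x : List Char)
    (hi0 : 0 ≤ i) (_hilt : i < (cs.length : Int)) (hip : i ∉ p) :
    fillAt cs (i :: p) (x0 :: x) = fillAt (cs.set i.toNat x0) p x := by
  apply List.ext_getElem
  · simp [length_fillAt]
  · intro j hj hj'
    have hjlen : j < cs.length := by simpa [length_fillAt] using hj
    rw [getElem_fillAt cs _ _ j hjlen,
        getElem_fillAt (cs.set i.toNat x0) p x j (by simpa using hjlen)]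
    rw [List.zip_cons_cons]
    by_cases hji : (j : Int) = i
    · rw [hji, lookup_cons_self, lookup_zip_eq_none p x _ hip]
      have hjn : j = i.toNat := by omega
      subst hjn
      simp [List.getElem_set_self]
    · rw [lookup_cons_ne i _ x0 _ hji]
      have hjn : j ≠ i.toNat := by omega
      rcases hh : (p.zip x).lookup (j : Int) with _ | v
      · simp [Ne.symm hjn]
      · simp

theorem subst_eq_fill (cs : List Char) (p : List Int) (x : List Char)
    (hnd : p.Nodup) (hr : ∀ i ∈ p, 0 ≤ i ∧ i < (cs.length : Int))
    (hlen : x.length = p.length) :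
    (p.zip x).foldl (fun buf pc => PySem.List.pySetD buf pc.1 pc.2) cs = fillAt cs p x := by
  induction p generalizing cs x with
  | nil => simp [fillAt_nil]
  | cons i p ih =>
    cases x with
    | nil => simp at hlen
    | cons x0 x =>
      have hi := hr i List.mem_cons_self
      have hset : PySem.List.pySetD cs i x0 = cs.set i.toNat x0 :=
        PySem.List.pySetD_of_nonneg cs x0 hi.1
      simp only [List.zip_cons_cons, List.foldl_cons, hset]
      rw [ih (cs.set i.toNat x0) x (List.nodup_cons.1 hnd).2
          (fun a ha => by have := hr a (List.mem_cons_of_mem _ ha); simpa using this)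
          (by simpa using hlen)]
      exact (fillAt_set cs i p x0 x hi.1 hi.2 (List.nodup_cons.1 hnd).1).symm

-- ---- injectivity of the variant strings on the ASCII domain ----
theorem mem_iff_fill_not_ascii (cs : List Char) (p : List Int) (x : List Char)
    (hDom : ∀ c ∈ cs, pvDomChar c = true)
    (hnd : p.Nodup) (hx : List.Forall₂ (· ∈ ·) x (poolsOf cs p))
    (j : Nat) (hj : j < cs.length) :
    ((j : Int) ∈ p) ↔ 126 < ((fillAt cs p x)[j]'(by rw [length_fillAt]; exact hj)).toNat := by
  rw [getElem_fillAt cs p x j hj]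
  have hlen : x.length = p.length := by simpa [poolsOf] using hx.length_eq
  constructor
  · intro hmem
    obtain ⟨t, ht, hpt⟩ := List.mem_iff_getElem.1 hmem
    rw [← hpt, lookup_zip_getElem p x hnd t ht hlen.symm]
    have hxt : x[t]'(hlen ▸ ht) ∈ (poolsOf cs p)[t]'(by simpa [poolsOf] using ht) := by
      have hfa := (List.forall₂_iff_get.1 hx).2 t (hlen ▸ ht) (by simpa [poolsOf] using ht)
      simpa using hfa
    simp only [poolsOf, List.getElem_map] at hxt
    simpa using hgAlts_not_ascii _ _ hxt
  · intro hgt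
    by_contra hmem
    rw [lookup_zip_eq_none p x _ hmem] at hgt
    simp only [Option.getD_none] at hgt
    have := dom_char_le cs[j] (hDom _ (List.getElem_mem _))
    omega

theorem fillAt_inj (cs : List Char) (p p' : List Int) (x x' : List Char)
    (hDom : ∀ c ∈ cs, pvDomChar c = true)
    (hr : ∀ i ∈ p, 0 ≤ i ∧ i < (cs.length : Int)) (hr' : ∀ i ∈ p', 0 ≤ i ∧ i < (cs.length : Int))
    (hs : p.Pairwise (· < ·)) (hs' : p'.Pairwise (· < ·))
    (hx : List.Forall₂ (· ∈ ·) x (poolsOf cs p)) (hx' : List.Forall₂ (· ∈ ·) x' (poolsOf cs p'))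
    (heq : fillAt cs p x = fillAt cs p' x') : p = p' ∧ x = x' := by
  have hnd : p.Nodup := hs.imp (fun h => ne_of_lt h)
  have hnd' : p'.Nodup := hs'.imp (fun h => ne_of_lt h)
  have hlen : x.length = p.length := by simpa [poolsOf] using hx.length_eq
  have hlen' : x'.length = p'.length := by simpa [poolsOf] using hx'.length_eq
  have hpp : p = p' := by
    apply List.Perm.eq_of_pairwise (le := (· < ·)) (fun a b _ _ h1 h2 => absurd h2 (by omega)) hs hs'
    rw [List.perm_ext_iff_of_nodup hnd hnd']
    intro i
    constructor
    · intro hi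
      have hi0 := hr i hi
      have hj : i.toNat < cs.length := by omega
      have hcast : ((i.toNat : Int)) = i := by omega
      have h1 := (mem_iff_fill_not_ascii cs p x hDom hnd hx i.toNat hj).1 (by rwa [hcast])
      rw [List.getElem_of_eq heq] at h1
      have h2 := (mem_iff_fill_not_ascii cs p' x' hDom hnd' hx' i.toNat hj).2 h1
      rwa [hcast] at h2
    · intro hi
      have hi0 := hr' i hi
      have hj : i.toNat < cs.length := by omega
      have hcast : ((i.toNat : Int)) = i := by omega
      have h1 := (mem_iff_fill_not_ascii cs p' x' hDom hnd' hx' i.toNat hj).1 (by rwa [hcast])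
      rw [List.getElem_of_eq heq.symm] at h1
      have h2 := (mem_iff_fill_not_ascii cs p x hDom hnd hx i.toNat hj).2 h1
      rwa [hcast] at h2
  subst hpp
  refine ⟨rfl, ?_⟩
  apply List.ext_getElem (by omega)
  intro t ht ht'
  have htp : t < p.length := by omega
  have hi0 := hr (p[t]'htp) (List.getElem_mem _)
  have hj : (p[t]'htp).toNat < cs.length := by omega
  have hcast : (((p[t]'htp).toNat : Int)) = p[t]'htp := by omega
  have e0 := List.getElem_of_eq heq (i := (p[t]'htp).toNat)
      (by rw [length_fillAt]; exact hj)
  rw [getElem_fillAt cs p x (p[t]'htp).toNat hj,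
      getElem_fillAt cs p x' (p[t]'htp).toNat hj] at e0
  rw [hcast, lookup_zip_getElem p x hnd t htp hlen.symm,
      lookup_zip_getElem p x' hnd t htp hlen'.symm] at e0
  simpa using e0

theorem fill_ne_name (cs : List Char) (p : List Int) (x : List Char)
    (hDom : ∀ c ∈ cs, pvDomChar c = true)
    (hr : ∀ i ∈ p, 0 ≤ i ∧ i < (cs.length : Int))
    (hs : p.Pairwise (· < ·)) (hne : p ≠ [])
    (hx : List.Forall₂ (· ∈ ·) x (poolsOf cs p)) :
    fillAt cs p x ≠ cs := by
  intro heq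
  obtain ⟨i, hi⟩ : ∃ i, i ∈ p := by
    cases p with
    | nil => exact absurd rfl hne
    | cons a _ => exact ⟨a, List.mem_cons_self⟩
  have hnd : p.Nodup := hs.imp (fun h => ne_of_lt h)
  have hi0 := hr i hi
  have hj : i.toNat < cs.length := by omega
  have hcast : ((i.toNat : Int)) = i := by omega
  have h1 := (mem_iff_fill_not_ascii cs p x hDom hnd hx i.toNat hj).1 (by rwa [hcast])
  rw [List.getElem_of_eq heq] at h1
  have := dom_char_le cs[i.toNat] (hDom _ (List.getElem_mem _))
  omega

-- ---- filtering the augmented product down to the all-alternative tuples ----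
theorem filter_pyProduct_aug (p : List Int) (F G : Int → List Char)
    (h : ∀ i ∈ p, ∀ y ∈ G i, y ∉ F i) :
    (pyProduct (p.map (fun i => F i ++ G i))).filter
        (fun x => (p.zip x).all (fun q => decide (q.2 ∈ F q.1)))
      = pyProduct (p.map F) := by
  induction p with
  | nil => simp [pyProduct]
  | cons i p ih =>
    simp only [List.map_cons, pyProduct, List.filter_flatMap]
    rw [List.flatMap_append]
    have hG : (G i).flatMap (fun x =>
        ((pyProduct (p.map (fun i => F i ++ G i))).map (x :: ·)).filter
          (fun y => ((i :: p).zip y).all (fun q => decide (q.2 ∈ F q.1)))) = [] := by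
      apply List.flatMap_eq_nil_iff.2
      intro x hxG
      rw [List.filter_map]
      have hfalse : ∀ t ∈ pyProduct (p.map (fun i => F i ++ G i)),
          ((fun y => ((i :: p).zip y).all (fun q => decide (q.2 ∈ F q.1))) ∘ (x :: ·)) t = false := by
        intro t _
        simp only [Function.comp_apply, List.zip_cons_cons, List.all_cons, Bool.and_eq_false_iff]
        exact Or.inl (by simpa using h i List.mem_cons_self x hxG)
      rw [List.filter_congr hfalse]
      simp
    rw [hG, List.append_nil, List.flatMap_def, List.flatMap_def]
    congr 1
    apply List.map_congr_left
    intro x hx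
    rw [List.filter_map]
    have htrue : ∀ t ∈ pyProduct (p.map (fun i => F i ++ G i)),
        ((fun y => ((i :: p).zip y).all (fun q => decide (q.2 ∈ F q.1))) ∘ (x :: ·)) t =
          (p.zip t).all (fun q => decide (q.2 ∈ F q.1)) := by
      intro t _
      simp [hx]
    rw [List.filter_congr htrue, ih (fun a ha y hy => h a (List.mem_cons_of_mem _ ha) y hy)]

-- ---- the set-building fold ----
theorem foldl_add_eq_append (L : List String) :
    ∀ (s : List String), ((L.filter (fun x => decide (x ∉ s))).Nodup) →
      L.foldl PySem.Set.add s = s ++ L.filter (fun x => decide (x ∉ s)) := by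
  induction L with
  | nil => intro s _; simp
  | cons x L ih =>
    intro s h
    by_cases hx : x ∈ s
    · rw [List.foldl_cons, PySem.Set.add_of_mem hx,
        List.filter_cons_of_neg (by simpa using hx)]
      exact ih s (by rwa [List.filter_cons_of_neg (by simpa using hx)] at h)
    · rw [List.filter_cons_of_pos (by simpa using hx)] at h
      have hxn : x ∉ L.filter (fun y => decide (y ∉ s)) := (List.nodup_cons.1 h).1
      have hnd : (L.filter (fun y => decide (y ∉ s))).Nodup := (List.nodup_cons.1 h).2
      have hkey : L.filter (fun y => decide (y ∉ s ++ [x])) = L.filter (fun y => decide (y ∉ s)) := by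
        apply List.filter_congr
        intro y hy
        by_cases hys : y ∈ s
        · simp [hys]
        · have hyx : y ≠ x := by
            intro hh; subst hh
            exact hxn (List.mem_filter.2 ⟨hy, by simpa using hys⟩)
          simp [hys, hyx]
      rw [List.foldl_cons, PySem.Set.add_of_not_mem hx,
        List.filter_cons_of_pos (by simpa using hx)]
      rw [ih (s ++ [x]) (by rwa [hkey]), hkey]
      simp

theorem nodup_foldl_add {α : Type} (f : α → String) (L : List α) :
    ∀ (s : List String), s.Nodup →
      (L.foldl (fun s c => PySem.Set.add s (f c)) s).Nodup := by
  induction L with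
  | nil => intro s h; simpa using h
  | cons x L ih => intro s h; exact ih _ (PySem.Set.nodup_add _ _ h)

theorem nodup_nested_foldl_add (todo : List (List Int)) (B : List Int → List (List Char)) :
    ∀ (s : List String), s.Nodup →
      (todo.foldl (fun s p => (B p).foldl
        (fun s c => PySem.Set.add s (String.ofList c)) s) s).Nodup := by
  induction todo with
  | nil => intro s h; simpa using h
  | cons p todo ih => intro s h; exact ih _ (nodup_foldl_add _ _ _ h)

-- ---- facts about the index list ----
theorem indicesOf_pairwise (cs : List Char) : (indicesOf cs).Pairwise (· < ·) := by
  unfold indicesOf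
  rw [List.pairwise_map]
  exact (PySem.List.pairwise_lt_enumerate cs 0).filter _

theorem indicesOf_range (cs : List Char) : ∀ i ∈ indicesOf cs, 0 ≤ i ∧ i < (cs.length : Int) := by
  intro i hi
  unfold indicesOf at hi
  simp only [List.mem_map, List.mem_filter] at hi
  obtain ⟨q, ⟨hq, _⟩, rfl⟩ := hi
  rw [PySem.List.mem_enumerate_iff] at hq
  obtain ⟨k, hk, rfl⟩ := hq
  constructor <;> omega

theorem indicesOf_sublist (cs : List Char) :
    (indicesOf cs).Sublist ((PySem.List.enumerate cs 0).map (fun q => q.1)) :=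
  List.Sublist.map _ List.filter_sublist

theorem enum_fst_pairwise (cs : List Char) :
    ((PySem.List.enumerate cs 0).map (fun q => q.1)).Pairwise (· < ·) := by
  rw [List.pairwise_map]
  exact PySem.List.pairwise_lt_enumerate cs 0

theorem charAt_enum (cs : List Char) :
    ∀ q ∈ PySem.List.enumerate cs 0, charAt cs q.1 = q.2 := by
  intro q hq
  rw [PySem.List.mem_enumerate_iff] at hq
  obtain ⟨k, hk, rfl⟩ := hq
  simp only [charAt, zero_add]
  rw [PySem.List.pyGetD_natCast]
  exact List.getD_eq_getElem cs ' ' hk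

theorem charAt_eq_getElem (cs : List Char) (i : Int) (h0 : 0 ≤ i) (h1 : i < (cs.length : Int)) :
    charAt cs i = cs[i.toNat]'(by omega) :=
  PySem.List.pyGetD_eq_getElem cs ' ' h0 h1

-- ---- A's per-block product, rewritten position-wise ----
theorem prod_options (f : Int → Char) :
    ∀ (e : List (Int × Char)) (p : List Int),
      p.Sublist (e.map (fun q => q.1)) → (e.map (fun q => q.1)).Pairwise (· < ·) →
      (∀ q ∈ e, f q.1 = q.2) →
      pyProduct (e.map (fun q => if q.1 ∈ p then hgAlts q.2 ++ [q.2] else [q.2]))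
        = (pyProduct (p.map (fun i => hgAlts (f i) ++ [f i]))).map
            (fun x => e.map (fun q => (((p.zip x).lookup q.1).getD q.2))) := by
  intro e
  induction e with
  | nil =>
    intro p hsub _ _
    have hp : p = [] := List.sublist_nil.1 (by simpa using hsub)
    subst hp
    simp [pyProduct]
  | cons q0 e ih =>
    obtain ⟨i, c⟩ := q0
    intro p hsub hpw hf
    have hpw2 : (i :: e.map (fun q => q.1)).Pairwise (· < ·) := by simpa using hpw
    have hilt : ∀ j ∈ e.map (fun q => q.1), i < j := (List.pairwise_cons.1 hpw2).1
    have hpw' : (e.map (fun q => q.1)).Pairwise (· < ·) := (List.pairwise_cons.1 hpw2).2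
    have hf' : ∀ q ∈ e, f q.1 = q.2 := fun q hq => hf q (List.mem_cons_of_mem _ hq)
    have hfic : f i = c := hf (i, c) List.mem_cons_self
    have hine : ∀ q ∈ e, q.1 ≠ i := by
      intro q hq hh
      exact absurd (hilt q.1 (List.mem_map.2 ⟨q, hq, rfl⟩)) (by omega)
    by_cases hmem : i ∈ p
    · -- the head position is substituted: p = i :: p'
      have hnotin : i ∉ e.map (fun q => q.1) := fun hh => absurd (hilt i hh) (by omega)
      obtain ⟨p', rfl, hp'⟩ : ∃ p', p = i :: p' ∧ p'.Sublist (e.map (fun q => q.1)) := by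
        rcases List.sublist_cons_iff.1 (by simpa using hsub) with h | ⟨r, rfl, hr⟩
        · exact absurd (h.mem hmem) hnotin
        · exact ⟨r, rfl, hr⟩
      have hip' : i ∉ p' := fun hh => hnotin (hp'.mem hh)
      have hopts : e.map (fun q => if q.1 ∈ i :: p' then hgAlts q.2 ++ [q.2] else [q.2])
          = e.map (fun q => if q.1 ∈ p' then hgAlts q.2 ++ [q.2] else [q.2]) := by
        apply List.map_congr_left
        intro q hq
        have : (q.1 ∈ i :: p') ↔ (q.1 ∈ p') := by
          simp [List.mem_cons, hine q hq]
        simp only [this]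
      have hfill : ∀ (x0 : Char) (x : List Char),
          ((i, c) :: e).map (fun q => ((((i :: p').zip (x0 :: x)).lookup q.1).getD q.2))
            = x0 :: e.map (fun q => (((p'.zip x).lookup q.1).getD q.2)) := by
        intro x0 x
        simp only [List.map_cons, List.zip_cons_cons, lookup_cons_self, Option.getD_some]
        congr 1
        apply List.map_congr_left
        intro q hq
        rw [lookup_cons_ne i q.1 x0 _ (hine q hq)]
      simp only [List.map_cons, pyProduct, if_pos (List.mem_cons_self : i ∈ i :: p'), hfic]
      rw [hopts, ih p' hp' hpw' hf', List.map_flatMap]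
      rw [List.flatMap_def, List.flatMap_def]
      congr 1
      apply List.map_congr_left
      intro x0 _
      rw [List.map_map, List.map_map]
      apply List.map_congr_left
      intro x _
      simp only [Function.comp_apply]
      exact (hfill x0 x).symm
    · -- the head position is kept: lookups at i miss
      have hsub' : p.Sublist (e.map (fun q => q.1)) := by
        rcases List.sublist_cons_iff.1 (by simpa using hsub) with h | ⟨r, rfl, _⟩
        · exact h
        · exact absurd (List.mem_cons_self) hmem
      have hfill : ∀ (x : List Char),
          ((i, c) :: e).map (fun q => (((p.zip x).lookup q.1).getD q.2))
            = c :: e.map (fun q => (((p.zip x).lookup q.1).getD q.2)) := by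
        intro x
        simp only [List.map_cons]
        rw [lookup_zip_eq_none p x i hmem]
        rfl
      simp only [List.map_cons, pyProduct, if_neg hmem]
      rw [ih p hsub' hpw' hf']
      simp only [List.flatMap_cons, List.flatMap_nil, List.append_nil, List.map_map]
      apply List.map_congr_left
      intro x _
      simp only [Function.comp_apply]
      exact (hfill x).symm

-- ---- blocks ----
theorem mem_blocksOf (ind : List Int) (R : Int) (p : List Int) (h : p ∈ blocksOf ind R) :
    p.Sublist ind ∧ 1 ≤ p.length ∧ (p.length : Int) < R := by
  unfold blocksOf at h
  simp only [List.mem_flatMap] at h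
  obtain ⟨r, hr, hp⟩ := h
  rw [PySem.List.mem_pyRange_one] at hr
  obtain ⟨hsub, hlen⟩ := of_mem_pyCombinations ind r.toNat p hp
  exact ⟨hsub, by omega, by omega⟩

theorem blocksOf_mem (ind : List Int) (R : Int) (q : List Int)
    (hsub : q.Sublist ind) (h1 : 1 ≤ q.length) (h2 : (q.length : Int) < R) :
    q ∈ blocksOf ind R := by
  unfold blocksOf
  simp only [List.mem_flatMap]
  refine ⟨(q.length : Int), ?_, ?_⟩
  · rw [PySem.List.mem_pyRange_one]; omega
  · have := mem_pyCombinations_of_sublist ind q hsub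
    simpa using this

theorem blocksOf_pairwise_len (ind : List Int) (R : Int) :
    (blocksOf ind R).Pairwise (fun a b => a.length ≤ b.length) := by
  unfold blocksOf
  rw [List.pairwise_flatMap]
  constructor
  · intro r _
    apply List.pairwise_of_forall_mem_list
    intro a ha b hb
    rw [(of_mem_pyCombinations ind r.toNat a ha).2, (of_mem_pyCombinations ind r.toNat b hb).2]
  · apply (PySem.List.pairwise_lt_pyRange_one 1 R).imp_of_mem
    intro r r' hr hr' hlt x hx y hy
    rw [PySem.List.mem_pyRange_one] at hr hr'
    rw [(of_mem_pyCombinations ind r.toNat x hx).2, (of_mem_pyCombinations ind r'.toNat y hy).2]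
    omega

theorem blocksOf_nodup (ind : List Int) (R : Int) (hind : ind.Nodup) :
    (blocksOf ind R).Nodup := by
  unfold blocksOf
  rw [List.nodup_flatMap]
  constructor
  · intro r _; exact nodup_pyCombinations ind r.toNat hind
  · apply (PySem.List.pairwise_lt_pyRange_one 1 R).imp_of_mem
    intro r r' hr hr' hlt
    rw [PySem.List.mem_pyRange_one] at hr hr'
    intro x hx hy
    have h1 := (of_mem_pyCombinations ind r.toNat x hx).2
    have h2 := (of_mem_pyCombinations ind r'.toNat x hy).2
    omega

-- ---- the master dedup lemma: A's set-fold over the blocks yields B's list ----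
theorem master (name : String) (R : Int)
    (hDom : ∀ c ∈ name.toList, pvDomChar c = true) :
    ∀ (todo done : List (List Int)),
      done ++ todo = blocksOf (indicesOf name.toList) R →
      todo.foldl
        (fun s p => (pyProduct (optionsOf name.toList p)).foldl
            (fun s combo => PySem.Set.add s (String.ofList combo)) s)
        (name :: done.flatMap (newOf name.toList))
      = name :: (blocksOf (indicesOf name.toList) R).flatMap (newOf name.toList) := by
  intro todo
  induction todo with
  | nil =>
    intro done h
    rw [List.append_nil] at h
    rw [h]
    rfl
  | cons p todo ih =>
    intro done h
    have hpB : p ∈ blocksOf (indicesOf name.toList) R := by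
      rw [← h]; exact List.mem_append.2 (Or.inr List.mem_cons_self)
    obtain ⟨hpsub, hp1, hpR⟩ := mem_blocksOf _ R p hpB
    have hindpw := indicesOf_pairwise name.toList
    have hindnd : (indicesOf name.toList).Nodup := hindpw.imp (fun h => ne_of_lt h)
    have hps : p.Pairwise (· < ·) := List.Pairwise.sublist hpsub hindpw
    have hpnd : p.Nodup := hps.imp (fun h => ne_of_lt h)
    have hpr : ∀ i ∈ p, 0 ≤ i ∧ i < (name.toList.length : Int) :=
      fun i hi => indicesOf_range name.toList i (hpsub.mem hi)
    -- A's block product in position-wise form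
    have hopts : pyProduct (optionsOf name.toList p)
        = (pyProduct (augPoolsOf name.toList p)).map (fun x => fillAt name.toList p x) := by
      have h1 := prod_options (charAt name.toList) (PySem.List.enumerate name.toList 0) p
        (hpsub.trans (indicesOf_sublist name.toList)) (enum_fst_pairwise name.toList)
        (charAt_enum name.toList)
      simpa only [optionsOf, augPoolsOf, fillAt] using h1
    -- facts about done / todo
    have hdoneB : ∀ q ∈ done, q ∈ blocksOf (indicesOf name.toList) R :=
      fun q hq => by rw [← h]; exact List.mem_append.2 (Or.inl hq)
    have hblocksnd := blocksOf_nodup (indicesOf name.toList) R hindnd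
    have hpnotdone : p ∉ done := by
      intro hpd
      rw [← h] at hblocksnd
      exact (List.nodup_append.1 hblocksnd).2.2 p hpd p List.mem_cons_self rfl
    have hlenmono : ∀ b ∈ todo, p.length ≤ b.length := by
      have hsubl : (p :: todo).Sublist (blocksOf (indicesOf name.toList) R) := by
        rw [← h]; exact List.sublist_append_right done _
      have := List.Pairwise.sublist hsubl (blocksOf_pairwise_len (indicesOf name.toList) R)
      exact (List.pairwise_cons.1 this).1
    -- the dedup characterization for this block
    have hchar : ∀ x ∈ pyProduct (augPoolsOf name.toList p),
        (String.ofList (fillAt name.toList p x) ∈ name :: done.flatMap (newOf name.toList)) ↔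
          ((p.zip x).all (fun pr => decide (pr.2 ∈ hgAlts (charAt name.toList pr.1))) = false) := by
      intro x hxP
      have hxlen : x.length = p.length := by
        rw [length_of_mem_pyProduct _ _ hxP]; simp [augPoolsOf]
      have hzmem : ∀ pr ∈ p.zip x,
          pr.2 ∈ hgAlts (charAt name.toList pr.1) ++ [charAt name.toList pr.1] := by
        apply zip_mem_of_forall₂ p x
          (fun i => hgAlts (charAt name.toList i) ++ [charAt name.toList i])
        have := (mem_pyProduct _ _).1 hxP
        simpa [augPoolsOf] using this
      constructor
      · intro hin
        rw [← Bool.not_eq_true]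
        intro hall
        have hxpool : List.Forall₂ (· ∈ ·) x (poolsOf name.toList p) := by
          have h1 := forall₂_of_zip_mem (p.zip x) (fun i => hgAlts (charAt name.toList i)) ?_
          · rwa [List.map_fst_zip (by omega), List.map_snd_zip (by omega)] at h1
          · intro pr hpr'
            have := List.all_eq_true.1 hall pr hpr'
            simpa using this
        rcases List.mem_cons.1 hin with hname | hflat
        · have hfc : fillAt name.toList p x = name.toList := by
            have := congrArg String.toList hname
            simpa using this
          exact fill_ne_name name.toList p x hDom hpr hps
            (by intro hh; rw [hh] at hp1; simp at hp1) hxpool hfc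
        · obtain ⟨q, hqdone, hvq⟩ := List.mem_flatMap.1 hflat
          obtain ⟨xq, hxqP, hveq⟩ := List.mem_map.1 hvq
          have hqB := hdoneB q hqdone
          obtain ⟨hqsub, hq1, hqR⟩ := mem_blocksOf _ R q hqB
          have hqs : q.Pairwise (· < ·) := List.Pairwise.sublist hqsub hindpw
          have hqnd : q.Nodup := hqs.imp (fun h => ne_of_lt h)
          have hqr : ∀ i ∈ q, 0 ≤ i ∧ i < (name.toList.length : Int) :=
            fun i hi => indicesOf_range name.toList i (hqsub.mem hi)
          have hxqpool : List.Forall₂ (· ∈ ·) xq (poolsOf name.toList q) :=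
            (mem_pyProduct _ _).1 hxqP
          have hxqlen : xq.length = q.length := by
            simpa [poolsOf] using hxqpool.length_eq
          have hsq : substituteB name.toList q xq = String.ofList (fillAt name.toList q xq) := by
            unfold substituteB
            rw [subst_eq_fill name.toList q xq hqnd hqr hxqlen]
          rw [hsq] at hveq
          have hfe : fillAt name.toList q xq = fillAt name.toList p x :=
            String.ofList_inj.1 hveq
          have := (fillAt_inj name.toList q p xq x hDom hqr hpr hqs hps hxqpool hxpool hfe).1
          exact hpnotdone (this ▸ hqdone)
      · intro hall
        obtain ⟨pr0, hpr0, hpr0f⟩ := List.all_eq_false.1 hall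
        have hfst : (p.zip x).map Prod.fst = p := List.map_fst_zip (by omega)
        have hknd : ((p.zip x).map Prod.fst).Nodup := by rw [hfst]; exact hpnd
        have hd : ∀ pr ∈ p.zip x,
            (fun pr => decide (pr.2 ∈ hgAlts (charAt name.toList pr.1))) pr = false →
            pr.2 = charAt name.toList pr.1 := by
          intro pr hpr' hPf
          rcases List.mem_append.1 (hzmem pr hpr') with hmem' | hmem'
          · exact absurd (by simpa using hmem') (by simpa using hPf)
          · simpa using hmem'
        have hfe : fillAt name.toList p x
            = fillAt name.toList
                (((p.zip x).filter (fun pr => decide (pr.2 ∈ hgAlts (charAt name.toList pr.1)))).map Prod.fst)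
                (((p.zip x).filter (fun pr => decide (pr.2 ∈ hgAlts (charAt name.toList pr.1)))).map Prod.snd) := by
          apply List.ext_getElem (by simp [length_fillAt])
          intro j hj hj'
          have hjl : j < name.toList.length := by simpa [length_fillAt] using hj
          rw [getElem_fillAt name.toList p x j hjl,
              getElem_fillAt name.toList _ _ j hjl]
          rw [zip_map_fst_snd']
          have hlk := lookup_filter_getD (p.zip x)
            (fun pr => decide (pr.2 ∈ hgAlts (charAt name.toList pr.1)))
            hknd (fun i => charAt name.toList i) hd (j : Int)
          have hca : charAt name.toList (j : Int) = name.toList[j] := by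
            rw [charAt_eq_getElem name.toList (j : Int) (by omega) (by omega)]
            simp
          rw [hca] at hlk
          exact hlk.symm
        set z' := (p.zip x).filter (fun pr => decide (pr.2 ∈ hgAlts (charAt name.toList pr.1))) with hz'
        have hqsubp : (z'.map Prod.fst).Sublist p := by
          rw [← hfst]; exact List.Sublist.map _ List.filter_sublist
        have hqlt : (z'.map Prod.fst).length < p.length := by
          have h1 : z'.length < (p.zip x).length :=
            List.length_filter_lt_length_iff_exists.2 ⟨pr0, hpr0, by simpa using hpr0f⟩
          have h2 : (p.zip x).length = p.length := by rw [List.length_zip]; omega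
          simpa using (by omega : z'.length < p.length)
        have hx'pool : List.Forall₂ (· ∈ ·) (z'.map Prod.snd)
            (poolsOf name.toList (z'.map Prod.fst)) := by
          have := forall₂_of_zip_mem z' (fun i => hgAlts (charAt name.toList i)) ?_
          · simpa [poolsOf] using this
          · intro pr hpr'
            have := (List.mem_filter.1 hpr').2
            simpa using this
        by_cases hq0 : z'.map Prod.fst = []
        · have hz'nil : z' = [] := List.map_eq_nil_iff.1 hq0
          have hfc : fillAt name.toList p x = name.toList := by
            rw [hfe, hz'nil]
            simpa using fillAt_nil name.toList []
          rw [hfc, String.ofList_toList]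
          exact List.mem_cons_self
        · have hq1' : 1 ≤ (z'.map Prod.fst).length := by
            have := List.length_pos_iff.2 hq0; omega
          have hqB : (z'.map Prod.fst) ∈ blocksOf (indicesOf name.toList) R :=
            blocksOf_mem _ R _ (hqsubp.trans hpsub) hq1' (by omega)
          have hqdone : (z'.map Prod.fst) ∈ done := by
            rw [← h] at hqB
            rcases List.mem_append.1 hqB with hd' | ht'
            · exact hd'
            · rcases List.mem_cons.1 ht' with heq' | htodo
              · rw [heq'] at hqlt; omega
              · have := hlenmono _ htodo; omega
          apply List.mem_cons_of_mem
          apply List.mem_flatMap.2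
          refine ⟨z'.map Prod.fst, hqdone, ?_⟩
          unfold newOf
          apply List.mem_map.2
          refine ⟨z'.map Prod.snd, (mem_pyProduct _ _).2 hx'pool, ?_⟩
          have hqs : (z'.map Prod.fst).Pairwise (· < ·) := List.Pairwise.sublist hqsubp hps
          have hqnd : (z'.map Prod.fst).Nodup := hqs.imp (fun h => ne_of_lt h)
          have hqr : ∀ i ∈ z'.map Prod.fst, 0 ≤ i ∧ i < (name.toList.length : Int) :=
            fun i hi => hpr i (hqsubp.mem hi)
          have hx'len : (z'.map Prod.snd).length = (z'.map Prod.fst).length := by simp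
          unfold substituteB
          rw [subst_eq_fill name.toList _ _ hqnd hqr hx'len]
          rw [← hfe]
      -- end hchar
    -- one block step
    have hstep : (pyProduct (optionsOf name.toList p)).foldl
        (fun s combo => PySem.Set.add s (String.ofList combo))
        (name :: done.flatMap (newOf name.toList))
        = name :: (done ++ [p]).flatMap (newOf name.toList) := by
      rw [hopts, List.foldl_map]
      have hfold : (pyProduct (augPoolsOf name.toList p)).foldl
          (fun s x => PySem.Set.add s (String.ofList (fillAt name.toList p x)))
          (name :: done.flatMap (newOf name.toList))
          = ((pyProduct (augPoolsOf name.toList p)).map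
              (fun x => String.ofList (fillAt name.toList p x))).foldl PySem.Set.add
            (name :: done.flatMap (newOf name.toList)) := (List.foldl_map).symm
      rw [hfold]
      have hfilter : ((pyProduct (augPoolsOf name.toList p)).map
            (fun x => String.ofList (fillAt name.toList p x))).filter
            (fun v => decide (v ∉ name :: done.flatMap (newOf name.toList)))
          = newOf name.toList p := by
        rw [List.filter_map]
        have hcongr : ∀ x ∈ pyProduct (augPoolsOf name.toList p),
            ((fun v => decide (v ∉ name :: done.flatMap (newOf name.toList))) ∘
              (fun x => String.ofList (fillAt name.toList p x))) x
              = (p.zip x).all (fun pr => decide (pr.2 ∈ hgAlts (charAt name.toList pr.1))) := by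
          intro x hx
          have hc := hchar x hx
          by_cases hL : String.ofList (fillAt name.toList p x)
              ∈ name :: done.flatMap (newOf name.toList)
          · simp [Function.comp, hL, hc.1 hL]
          · have hne : ((p.zip x).all
                (fun pr => decide (pr.2 ∈ hgAlts (charAt name.toList pr.1)))) ≠ false :=
              fun hf => hL (hc.2 hf)
            have hT : ((p.zip x).all
                (fun pr => decide (pr.2 ∈ hgAlts (charAt name.toList pr.1)))) = true := by
              simpa using hne
            simp [Function.comp, hL, hT]
        rw [List.filter_congr hcongr]
        have haug : augPoolsOf name.toList p
            = p.map (fun i => hgAlts (charAt name.toList i) ++ [charAt name.toList i]) := rfl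
        rw [haug, filter_pyProduct_aug p (fun i => hgAlts (charAt name.toList i))
            (fun i => [charAt name.toList i]) ?_]
        · unfold newOf poolsOf
          apply List.map_congr_left
          intro x hxp
          have hxlen : x.length = p.length := by
            rw [length_of_mem_pyProduct _ _ hxp]; simp
          unfold substituteB
          rw [subst_eq_fill name.toList p x hpnd hpr hxlen]
        · intro i hi y hy hmem'
          have hy' : y = charAt name.toList i := by simpa using hy
          subst hy'
          have hi0 := hpr i hi
          have hdc : pvDomChar (charAt name.toList i) = true := by
            rw [charAt_eq_getElem name.toList i hi0.1 hi0.2]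
            exact hDom _ (List.getElem_mem _)
          exact hgAlts_not_mem_self _ hdc hmem'
      have hnodup : (newOf name.toList p).Nodup := by
        unfold newOf
        have hmapeq : (pyProduct (poolsOf name.toList p)).map
              (fun choice => substituteB name.toList p choice)
            = (pyProduct (poolsOf name.toList p)).map
              (fun x => String.ofList (fillAt name.toList p x)) := by
          apply List.map_congr_left
          intro x hxp
          have hxlen : x.length = p.length := by
            rw [length_of_mem_pyProduct _ _ hxp]; simp [poolsOf]
          unfold substituteB
          rw [subst_eq_fill name.toList p x hpnd hpr hxlen]
        rw [hmapeq]
        apply List.Nodup.map_on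
        · intro x hxm y hym heq2
          exact (fillAt_inj name.toList p p x y hDom hpr hpr hps hps
            ((mem_pyProduct _ _).1 hxm) ((mem_pyProduct _ _).1 hym)
            (String.ofList_inj.1 heq2)).2
        · apply nodup_pyProduct
          intro l hl
          simp only [poolsOf, List.mem_map] at hl
          obtain ⟨i, _, rfl⟩ := hl
          exact hgAlts_nodup _
      rw [foldl_add_eq_append _ _ (by rw [hfilter]; exact hnodup), hfilter]
      simp
    rw [List.foldl_cons, hstep]
    exact ih (done ++ [p]) (by rw [List.append_assoc]; simpa using h)

-- ---- assembling the two programs ----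
theorem A_as_blocks (name : String) (max_replacements : Int) :
    unicode_homoglyphs name max_replacements
      = (blocksOf (indicesOf name.toList)
            (min (max_replacements + 1) (((indicesOf name.toList).length : Int) + 1))).foldl
          (fun s p => (pyProduct (optionsOf name.toList p)).foldl
            (fun s combo => PySem.Set.add s (String.ofList combo)) s) [name] := by
  unfold unicode_homoglyphs blocksOf
  rw [List.foldl_flatMap]
  rfl

theorem B_as_blocks (name : String) (max_replacements : Int) :
    unicode_homoglyphs_alt name max_replacements
      = PySem.Set.ofList (name ::
          (blocksOf (indicesOf name.toList)
              (min max_replacements ((indicesOf name.toList).length : Int) + 1)).flatMap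
            (newOf name.toList)) := by
  unfold unicode_homoglyphs_alt
  simp only [PySem.List.foldl_append_singleton_eq_map, PySem.List.foldl_append_eq_flatMap]
  unfold blocksOf
  rw [List.flatMap_assoc]
  rfl

-- ===== VERDICT (by name: the statement is the Claim_ definition above) =====
theorem unicode_homoglyphs_spec : Claim_equal_unicode_homoglyphs := by
  intro name mr hDom
  unfold Spec_unicode_homoglyphs
  have hDomChars : ∀ c ∈ name.toList, pvDomChar c = true := by
    have h1 : pvDomStr name = true := by
      unfold Dom_unicode_homoglyphs at hDom
      simp only [Bool.and_eq_true] at hDom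
      exact hDom.1
    unfold pvDomStr at h1
    exact fun c hc => List.all_eq_true.1 h1 c hc
  have hR : min (mr + 1) (((indicesOf name.toList).length : Int) + 1)
      = min mr ((indicesOf name.toList).length : Int) + 1 := by omega
  have hmaster := master name (min mr ((indicesOf name.toList).length : Int) + 1) hDomChars
    (blocksOf (indicesOf name.toList) (min mr ((indicesOf name.toList).length : Int) + 1))
    [] (by simp)
  have hAval : unicode_homoglyphs name mr
      = name :: (blocksOf (indicesOf name.toList)
          (min mr ((indicesOf name.toList).length : Int) + 1)).flatMap (newOf name.toList) := by
    rw [A_as_blocks name mr, hR]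
    simpa using hmaster
  have hNodup : (name :: (blocksOf (indicesOf name.toList)
      (min mr ((indicesOf name.toList).length : Int) + 1)).flatMap (newOf name.toList)).Nodup := by
    rw [← hAval, A_as_blocks name mr]
    have := nodup_nested_foldl_add
      (blocksOf (indicesOf name.toList)
        (min (mr + 1) (((indicesOf name.toList).length : Int) + 1)))
      (fun p => pyProduct (optionsOf name.toList p)) [name] (by simp)
    exact this
  rw [hAval, B_as_blocks name mr, PySem.Set.ofList_eq_self_of_nodup _ hNodup]
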